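-- pv_equiv track=rewrite | github.com/salt-mountain/advent-of-code | 2024/02/part2.py | dampened_check_delta
-- ===== SOURCE A (Python) =====
-- def check_delta(report):
--     for i in range(len(report) - 1):  # Iterate through adjacent pairs
--         if abs(report[i] - report[i + 1]) not in [1, 2, 3]:  # Validate the difference
--             return False  # Return False if any difference is out of range
--     return True  # Return True only if all differences are valid
--
-- def dampened_check_delta(reports):
--     checks = len(reports)
--     if check_delta(reports): # nothing to do here
--         return True, reports
--     for position in range(checks):
--         modified_numbers = [
--             report for pos, report in enumerate(reports) if pos != position
--         ]
--         if check_delta(modified_numbers):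
--             return True, modified_numbers
--     return False, reports
-- ===== SOURCE B (Python) =====
-- def _chain_ok(seq):
--     return all(1 <= abs(a - b) <= 3 for a, b in zip(seq, seq[1:]))
--
-- def dampened_check_delta(reports):
--     # Find the first adjacent pair whose gap is invalid; only removing one of
--     # its two endpoints (or the element just before) can help, so at most three
--     # candidate removals are tested instead of all n.
--     bad = next((i for i, (a, b) in enumerate(zip(reports, reports[1:]))
--                 if not 1 <= abs(a - b) <= 3), None)
--     if bad is None:
--         return True, reports
--     for p in (bad - 1, bad, bad + 1):
--         if p >= 0:
--             candidate = reports[:p] + reports[p + 1:]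
--             if _chain_ok(candidate):
--                 return True, candidate
--     return False, reports
-- ===== Notes on version B (the rewrite author's own statement) =====
-- stated objective: faster
-- what changed: Instead of rebuilding and re-checking the list for every removal position, B finds the first invalid adjacent pair in one pass and only tests the three removal positions that can repair it (bad-1, bad, bad+1), since any other removal leaves that bad pair adjacent.
import Mathlib
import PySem

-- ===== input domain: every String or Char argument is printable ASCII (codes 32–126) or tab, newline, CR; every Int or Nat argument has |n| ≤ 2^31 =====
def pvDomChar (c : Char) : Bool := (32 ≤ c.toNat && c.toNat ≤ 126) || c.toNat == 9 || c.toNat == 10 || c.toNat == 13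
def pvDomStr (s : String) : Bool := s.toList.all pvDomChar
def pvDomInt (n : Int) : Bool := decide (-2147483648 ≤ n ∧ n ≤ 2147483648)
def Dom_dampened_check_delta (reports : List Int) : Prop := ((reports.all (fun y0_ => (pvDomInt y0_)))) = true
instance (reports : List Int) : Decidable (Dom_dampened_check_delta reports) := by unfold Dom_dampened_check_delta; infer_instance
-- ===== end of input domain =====

-- B replaces A's scan over all n removal positions (each rebuilding and re-checking the
-- list) by finding the first invalid adjacent pair and testing only the three removal
-- positions that can repair it; equal output proved on the full domain.


-- ===== PORT A =====
-- for i in range(len(report)-1): if abs(report[i]-report[i+1]) not in [1,2,3]: return False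
def checkDeltaLoopA (report : List Int) : List Int → Bool
  | [] => true
  | i :: rest =>
      if !(([1, 2, 3] : List Int).contains
            |PySem.List.pyGetD report i 0 - PySem.List.pyGetD report (i + 1) 0|) then
        false
      else checkDeltaLoopA report rest

def check_delta_A (report : List Int) : Bool :=
  checkDeltaLoopA report (PySem.List.pyRange 0 ((report.length : Int) - 1) 1)

-- [report for pos, report in enumerate(reports) if pos != position]
def removeAtA (reports : List Int) (position : Int) : List Int :=
  (PySem.List.enumerate reports 0).filterMap
    (fun px => if px.1 ≠ position then some px.2 else none)

def dampLoopA (reports : List Int) : List Int → Bool × List Int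
  | [] => (false, reports)
  | position :: rest =>
      let modified := removeAtA reports position
      if check_delta_A modified then (true, modified) else dampLoopA reports rest

def dampened_check_delta (reports : List Int) : Bool × List Int :=
  let checks : Int := reports.length
  if check_delta_A reports then (true, reports)
  else dampLoopA reports (PySem.List.pyRange 0 checks 1)

-- ===== PORT B =====
-- all(1 <= abs(a-b) <= 3 for a, b in zip(seq, seq[1:]))
def chain_ok_B (seq : List Int) : Bool :=
  (seq.zip seq.tail).all (fun p => 1 ≤ |p.1 - p.2| && |p.1 - p.2| ≤ 3)

-- next((i for i,(a,b) in enumerate(zip(reports, reports[1:])) if not 1<=abs(a-b)<=3), None)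
def firstBadB (reports : List Int) : Option Int :=
  ((PySem.List.enumerate (reports.zip reports.tail) 0).find?
      (fun p => !(1 ≤ |p.2.1 - p.2.2| && |p.2.1 - p.2.2| ≤ 3))).map (·.1)

def tryCandsB (reports : List Int) : List Int → Bool × List Int
  | [] => (false, reports)
  | p :: rest =>
      if 0 ≤ p then
        -- reports[:p] + reports[p+1:]
        let candidate := PySem.List.slice reports none (some p) ++
                         PySem.List.slice reports (some (p + 1)) none
        if chain_ok_B candidate then (true, candidate) else tryCandsB reports rest
      else tryCandsB reports rest

def dampened_check_delta_alt (reports : List Int) : Bool × List Int :=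
  match firstBadB reports with
  | none => (true, reports)
  | some bad => tryCandsB reports [bad - 1, bad, bad + 1]

-- ===== PRECONDITION & SPEC =====
def Spec_dampened_check_delta (reports : List Int) (out : Bool × List Int) : Prop := out = dampened_check_delta_alt reports
instance (reports : List Int) (out : Bool × List Int) : Decidable (Spec_dampened_check_delta reports out) := by unfold Spec_dampened_check_delta; infer_instance

-- ===== CLAIM (what is proved, stated in full; the proofs are below) =====
def Claim_equal_dampened_check_delta : Prop := ∀ (reports : List Int), Dom_dampened_check_delta reports → Spec_dampened_check_delta reports (dampened_check_delta reports)

-- ===== LEMMAS AND PROOFS =====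

-- the adjacent-pair validity test both programs use
def validP (a b : Int) : Bool := 1 ≤ |a - b| && |a - b| ≤ 3

-- structural "all adjacent pairs valid"
def chainOk : List Int → Bool
  | a :: b :: t => validP a b && chainOk (b :: t)
  | _ => true

-- structural "index of first invalid adjacent pair"
def fb : List Int → Option Nat
  | a :: b :: t => if validP a b then (fb (b :: t)).map (· + 1) else some 0
  | _ => none


lemma chainOk_cons_false (x : Int) (m : List Int) (h : chainOk m = false) : chainOk (x :: m) = false := by
  cases m with
  | nil => simp [chainOk] at h
  | cons b t => simp [chainOk] at h ⊢; tauto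
lemma chain_ok_B_eq (seq : List Int) : chain_ok_B seq = chainOk seq := by
  induction seq with
  | nil => rfl
  | cons a t ih =>
    cases t with
    | nil => rfl
    | cons b u =>
      simp [chain_ok_B, chainOk, validP] at ih ⊢
      tauto

lemma mem123 (x : Int) : (([1, 2, 3] : List Int).contains x) = (1 ≤ x && x ≤ 3) := by
  rw [List.contains_eq_mem x [1,2,3]]
  simp only [List.mem_cons, List.not_mem_nil, or_false]
  by_cases h : (1:Int) ≤ x ∧ x ≤ 3
  · have : x = 1 ∨ x = 2 ∨ x = 3 := by omega
    simp [this, h]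
  · have h1 : ¬(x = 1 ∨ x = 2 ∨ x = 3) := by omega
    simp [h1]
    omega

lemma loopA_shift (idxs : List Int) (x : Int) (l : List Int) (h : ∀ i ∈ idxs, 0 ≤ i) :
    checkDeltaLoopA (x :: l) (idxs.map (· + 1)) = checkDeltaLoopA l idxs := by
  induction idxs with
  | nil => rfl
  | cons i rest ih =>
    have hi : 0 ≤ i := h i (by simp)
    have h1 : PySem.List.pyGetD (x :: l) (i + 1) 0 = PySem.List.pyGetD l i 0 := by
      rw [PySem.List.pyGetD_of_nonneg _ _ (by omega), PySem.List.pyGetD_of_nonneg _ _ hi]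
      have : (i + 1).toNat = i.toNat + 1 := by omega
      simp [this]
    have h2 : PySem.List.pyGetD (x :: l) (i + 1 + 1) 0 = PySem.List.pyGetD l (i + 1) 0 := by
      rw [PySem.List.pyGetD_of_nonneg _ _ (by omega), PySem.List.pyGetD_of_nonneg _ _ (by omega : (0:Int) ≤ i + 1)]
      have : (i + 1 + 1).toNat = (i + 1).toNat + 1 := by omega
      simp [this]
    simp only [List.map_cons, checkDeltaLoopA, h1, h2]
    split <;> [rfl; exact ih (fun j hj => h j (by simp [hj]))]

lemma pyRange_one_shift (b : Int) :
    PySem.List.pyRange 1 (b + 1) = (PySem.List.pyRange 0 b).map (· + 1) := by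
  rw [PySem.List.pyRange_one, PySem.List.pyRange_one]
  have : (b + 1 - 1).toNat = (b - 0).toNat := by omega
  rw [this, List.map_map]
  exact List.map_congr_left fun k _ => by simp; omega

lemma check_eq_chain (r : List Int) : check_delta_A r = chainOk r := by
  induction r with
  | nil => rfl
  | cons a t ih =>
    cases t with
    | nil => rfl
    | cons b u =>
      unfold check_delta_A
      have hlen : ((a :: b :: u).length : Int) - 1 = (u.length : Int) + 1 := by
        simp
      rw [hlen, PySem.List.pyRange_one_cons (by omega : (0:Int) < (u.length : Int) + 1)]
      have e0 : PySem.List.pyGetD (a :: b :: u) 0 0 = a := by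
        rw [PySem.List.pyGetD_of_nonneg _ _ le_rfl]; rfl
      have e1 : PySem.List.pyGetD (a :: b :: u) (0 + 1) 0 = b := by
        rw [PySem.List.pyGetD_of_nonneg _ _ (by omega)]; rfl
      have hshift : PySem.List.pyRange (0 + 1) ((u.length : Int) + 1) =
          (PySem.List.pyRange 0 (u.length : Int)).map (· + 1) := by
        simpa using pyRange_one_shift (u.length : Int)
      simp only [checkDeltaLoopA, e0, e1, hshift]
      rw [loopA_shift _ _ _ (fun j hj => ((PySem.List.mem_pyRange_one).1 hj).1)]
      have hrec : checkDeltaLoopA (b :: u) (PySem.List.pyRange 0 (u.length : Int)) =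
          check_delta_A (b :: u) := by
        unfold check_delta_A
        congr 1
        simp
      rw [hrec, ih]
      rw [mem123]
      show (if !(1 ≤ |a - b| && |a - b| ≤ 3) then false else chainOk (b :: u)) = chainOk (a :: b :: u)
      simp only [chainOk, validP]
      cases h13 : (1 ≤ |a - b| && |a - b| ≤ 3) <;> simp_all

lemma find?_enum_succ (P : Int × Int → Bool) (l : List (Int × Int)) : ∀ (s : Int),
    ((PySem.List.enumerate l (s + 1)).find? (fun p => P p.2)).map (·.1) =
    (((PySem.List.enumerate l s).find? (fun p => P p.2)).map (·.1)).map (· + 1) := by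
  induction l with
  | nil => intro s; simp [PySem.List.enumerate_nil]
  | cons x t ih =>
    intro s
    rw [PySem.List.enumerate_cons, PySem.List.enumerate_cons]
    by_cases hx : P x
    · simp [hx]
    · simp only [List.find?_cons, hx]
      simpa using ih (s + 1)

lemma firstBadB_eq (r : List Int) : firstBadB r = (fb r).map (fun n => (n : Int)) := by
  induction r with
  | nil => rfl
  | cons a t ih =>
    cases t with
    | nil => rfl
    | cons b u =>
      unfold firstBadB fb
      simp only [List.zip_cons_cons, List.tail_cons, PySem.List.enumerate_cons]
      rw [List.find?_cons]
      cases hv : validP a b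
      · simp only [validP] at hv
        simp [hv]
      · simp only [validP] at hv
        simp only [hv, Bool.not_true, if_true]
        have hs := find?_enum_succ (fun q => !(1 ≤ |q.1 - q.2| && |q.1 - q.2| ≤ 3))
          ((b :: u).zip u) 0
        simp only [zero_add] at hs ⊢
        rw [hs]
        have ihh : ((PySem.List.enumerate ((b :: u).zip u) 0).find?
            (fun p => !(1 ≤ |p.2.1 - p.2.2| && |p.2.1 - p.2.2| ≤ 3))).map (·.1) =
            (fb (b :: u)).map (fun n => (n : Int)) := by
          have h2 := ih
          unfold firstBadB at h2
          simpa using h2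
        rw [ihh]
        cases fb (b :: u) <;> simp

lemma filtEnum_all (l : List Int) : ∀ (s p : Int), p < s →
    (PySem.List.enumerate l s).filterMap
      (fun px => if px.1 ≠ p then some px.2 else none) = l := by
  induction l with
  | nil => intro s p _; simp [PySem.List.enumerate_nil]
  | cons x t ih =>
    intro s p hps
    rw [PySem.List.enumerate_cons]
    simp only [List.filterMap_cons]
    have : (s ≠ p) = True := by simp; omega
    simp only [this, if_true]
    rw [ih (s + 1) p (by omega)]

lemma enumFilt (l : List Int) : ∀ (s : Int) (p : Nat),
    (PySem.List.enumerate l s).filterMap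
      (fun px => if px.1 ≠ s + (p : Int) then some px.2 else none) =
    l.take p ++ l.drop (p + 1) := by
  induction l with
  | nil => intro s p; simp [PySem.List.enumerate_nil]
  | cons x t ih =>
    intro s p
    rw [PySem.List.enumerate_cons]
    simp only [List.filterMap_cons]
    cases p with
    | zero =>
      have : (s ≠ s + ((0:Nat) : Int)) = False := by simp
      simp only [this, if_false]
      rw [show s + ((0:Nat):Int) = s from by simp] at *
      rw [filtEnum_all t (s+1) s (by omega)]
      simp
    | succ q =>
      have : (s ≠ s + ((q+1:Nat) : Int)) = True := by simp; omega
      simp only [this, if_true]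
      have hsq : s + ((q+1:Nat) : Int) = (s+1) + ((q:Nat) : Int) := by push_cast; ring
      rw [hsq, ih (s+1) q]
      simp

lemma removeA_take_drop (l : List Int) (p : Nat) :
    removeAtA l (p : Int) = l.take p ++ l.drop (p + 1) := by
  unfold removeAtA
  have := enumFilt l 0 p
  simpa using this

lemma fb_some_chainOk (r : List Int) : ∀ (i : Nat), fb r = some i → chainOk r = false := by
  induction r with
  | nil => intro i h; simp [fb] at h
  | cons a t ih =>
    intro i h
    cases t with
    | nil => simp [fb] at h
    | cons b u =>
      rw [fb] at h
      rw [chainOk]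
      cases hv : validP a b
      · rw [Bool.false_and]
      · rw [hv] at h; simp only [if_true] at h
        cases hfb : fb (b :: u) with
        | none => rw [hfb] at h; simp at h
        | some j => rw [ih j hfb]; simp
lemma fb_none_chainOk (r : List Int) : fb r = none → chainOk r = true := by
  induction r with
  | nil => intro h; rfl
  | cons a t ih =>
    intro h
    cases t with
    | nil => rfl
    | cons b u =>
      rw [fb] at h
      rw [chainOk]
      cases hv : validP a b
      · rw [hv] at h; simp at h
      · rw [hv] at h; simp only [if_true] at h
        cases hfb : fb (b :: u) with
        | none => rw [ih hfb]; simp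
        | some j => rw [hfb] at h; simp at h
lemma fb_lt (r : List Int) : ∀ (i : Nat), fb r = some i → i + 2 ≤ r.length := by
  induction r with
  | nil => intro i h; simp [fb] at h
  | cons a t ih =>
    intro i h
    cases t with
    | nil => simp [fb] at h
    | cons b u =>
      rw [fb] at h
      cases hv : validP a b
      · rw [hv] at h; simp at h; simp [← h]
      · rw [hv] at h; simp only [if_true] at h
        cases hfb : fb (b :: u) with
        | none => rw [hfb] at h; simp at h
        | some j =>
          rw [hfb] at h; simp at h
          have := ih j hfb
          simp at this ⊢
          omega

lemma left_fail (r : List Int) : ∀ (i p : Nat), fb r = some i → p + 2 ≤ i →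
    chainOk (r.take p ++ r.drop (p + 1)) = false := by
  induction r with
  | nil => intro i p h _; simp [fb] at h
  | cons a t ih =>
    intro i p h hp
    cases t with
    | nil => simp [fb] at h
    | cons b u =>
      rw [fb] at h
      cases hv : validP a b
      · rw [hv] at h; simp at h; omega
      · rw [hv] at h; simp only [if_true] at h
        cases hfb : fb (b :: u) with
        | none => rw [hfb] at h; simp at h
        | some j =>
          rw [hfb] at h; simp at h
          cases p with
          | zero =>
            simp only [List.take_zero, List.nil_append]
            exact fb_some_chainOk (b :: u) j hfb
          | succ q =>
            have : ((a :: b :: u).take (q + 1) ++ (a :: b :: u).drop (q + 1 + 1)) =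
                a :: ((b :: u).take q ++ (b :: u).drop (q + 1)) := by
              simp [List.take_succ_cons, List.drop_succ_cons]
            rw [this]
            exact chainOk_cons_false a _ (ih j q hfb (by omega))

lemma right_fail (r : List Int) : ∀ (i p : Nat), fb r = some i → i + 2 ≤ p →
    chainOk (r.take p ++ r.drop (p + 1)) = false := by
  induction r with
  | nil => intro i p h _; simp [fb] at h
  | cons a t ih =>
    intro i p h hp
    cases t with
    | nil => simp [fb] at h
    | cons b u =>
      rw [fb] at h
      cases hv : validP a b
      · rw [hv] at h; simp at h
        subst h
        obtain ⟨q, rfl⟩ : ∃ q, p = q + 2 := ⟨p - 2, by omega⟩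
        have : ((a :: b :: u).take (q + 2) ++ (a :: b :: u).drop (q + 2 + 1)) =
            a :: b :: (u.take q ++ u.drop (q + 1)) := by
          simp [List.take_succ_cons, List.drop_succ_cons]
        rw [this, chainOk, hv, Bool.false_and]
      · rw [hv] at h; simp only [if_true] at h
        cases hfb : fb (b :: u) with
        | none => rw [hfb] at h; simp at h
        | some j =>
          rw [hfb] at h; simp at h
          obtain ⟨q, rfl⟩ : ∃ q, p = q + 1 := ⟨p - 1, by omega⟩
          have : ((a :: b :: u).take (q + 1) ++ (a :: b :: u).drop (q + 1 + 1)) =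
              a :: ((b :: u).take q ++ (b :: u).drop (q + 1)) := by
            simp [List.take_succ_cons, List.drop_succ_cons]
          rw [this]
          exact chainOk_cons_false a _ (ih j q hfb (by omega))

lemma dampLoopA_skip (r : List Int) (ps qs : List Int)
    (h : ∀ p ∈ ps, check_delta_A (removeAtA r p) = false) :
    dampLoopA r (ps ++ qs) = dampLoopA r qs := by
  induction ps with
  | nil => rfl
  | cons p rest ih =>
    rw [List.cons_append, dampLoopA]
    simp only [h p (by simp), Bool.false_eq_true, if_false]
    exact ih (fun x hx => h x (by simp [hx]))

lemma dampLoopA_none (r : List Int) (ps : List Int)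
    (h : ∀ p ∈ ps, check_delta_A (removeAtA r p) = false) :
    dampLoopA r ps = (false, r) := by
  have := dampLoopA_skip r ps [] h
  simpa using this

-- the candidate list both programs build for removal position p
def cand (r : List Int) (p : Nat) : List Int := r.take p ++ r.drop (p + 1)

lemma removeA_int (r : List Int) (p : Int) (hp : 0 ≤ p) :
    removeAtA r p = cand r p.toNat := by
  have := removeA_take_drop r p.toNat
  rw [Int.toNat_of_nonneg hp] at this
  exact this

lemma candB_int (r : List Int) (p : Int) (hp : 0 ≤ p) :
    PySem.List.slice r none (some p) ++ PySem.List.slice r (some (p + 1)) none = cand r p.toNat := by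
  rw [PySem.List.slice_to r hp, PySem.List.slice_from r (by omega : (0:Int) ≤ p + 1)]
  have : (p + 1).toNat = p.toNat + 1 := by omega
  rw [this]; rfl

lemma step_match (r : List Int) (p : Int) (hp : 0 ≤ p) (rest restB : List Int)
    (hcont : dampLoopA r rest = tryCandsB r restB) :
    dampLoopA r (p :: rest) = tryCandsB r (p :: restB) := by
  rw [dampLoopA, tryCandsB]
  simp only [hp, if_true]
  rw [removeA_int r p hp, check_eq_chain, candB_int r p hp, chain_ok_B_eq]
  split
  · rfl
  · exact hcont

lemma tryCands_neg (r : List Int) (p : Int) (hp : p < 0) (restB : List Int) :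
    tryCandsB r (p :: restB) = tryCandsB r restB := by
  rw [tryCandsB]
  simp only [show ¬ (0 ≤ p) from by omega, if_false]

lemma fail_int (r : List Int) (i : Nat) (hfb : fb r = some i) (p : Int) (hp : 0 ≤ p)
    (hfar : p + 2 ≤ (i : Int) ∨ (i : Int) + 2 ≤ p) :
    check_delta_A (removeAtA r p) = false := by
  rw [removeA_int r p hp, check_eq_chain]
  rcases hfar with h | h
  · exact left_fail r i p.toNat hfb (by omega)
  · exact right_fail r i p.toNat hfb (by omega)

-- ===== VERDICT (by name: the statement is the Claim_ definition above) =====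
theorem dampened_check_delta_spec : Claim_equal_dampened_check_delta := by
  unfold Claim_equal_dampened_check_delta
  intro r _
  unfold Spec_dampened_check_delta
  unfold dampened_check_delta dampened_check_delta_alt
  rw [firstBadB_eq r]
  cases hfb : fb r with
  | none =>
    have hc : chainOk r = true := fb_none_chainOk r hfb
    simp only [check_eq_chain, hc, if_true]
    rfl
  | some i =>
    have hc : chainOk r = false := fb_some_chainOk r i hfb
    have hlen : i + 2 ≤ r.length := fb_lt r i hfb
    simp only [check_eq_chain, hc, Bool.false_eq_true, if_false]
    show dampLoopA r (PySem.List.pyRange 0 (r.length : Int)) =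
      tryCandsB r [(i : Int) - 1, (i : Int), (i : Int) + 1]
    have htail : dampLoopA r (PySem.List.pyRange ((i : Int) + 1 + 1) (r.length : Int)) =
        tryCandsB r [] := by
      rw [dampLoopA_none]
      · rfl
      · intro p hp
        have hmem := (PySem.List.mem_pyRange_one).1 hp
        exact fail_int r i hfb p (by omega) (Or.inr (by omega))
    have hone : dampLoopA r (PySem.List.pyRange ((i : Int) + 1) (r.length : Int)) =
        tryCandsB r [(i : Int) + 1] := by
      rw [PySem.List.pyRange_one_cons (by omega : (i : Int) + 1 < (r.length : Int))]
      exact step_match r ((i : Int) + 1) (by omega) _ _ htail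
    have htwo : dampLoopA r (PySem.List.pyRange (i : Int) (r.length : Int)) =
        tryCandsB r [(i : Int), (i : Int) + 1] := by
      rw [PySem.List.pyRange_one_cons (by omega : (i : Int) < (r.length : Int))]
      exact step_match r (i : Int) (by omega) _ _ hone
    by_cases hi : i = 0
    · subst hi
      simp only [Nat.cast_zero] at htwo ⊢
      rw [tryCands_neg r (0 - 1) (by norm_num)]
      exact htwo
    · have hsplit : PySem.List.pyRange 0 (r.length : Int) =
          PySem.List.pyRange 0 ((i : Int) - 1) ++ PySem.List.pyRange ((i : Int) - 1) (r.length : Int) := by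
        exact PySem.List.pyRange_one_append 0 ((i : Int) - 1) (r.length : Int) (by omega) (by omega)
      rw [hsplit, dampLoopA_skip]
      · rw [PySem.List.pyRange_one_cons (by omega : (i : Int) - 1 < (r.length : Int))]
        have e1 : (i : Int) - 1 + 1 = (i : Int) := by ring
        rw [e1]
        exact step_match r ((i : Int) - 1) (by omega) _ _ htwo
      · intro p hp
        have hmem := (PySem.List.mem_pyRange_one).1 hp
        exact fail_int r i hfb p (by omega) (Or.inl (by omega))
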